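-- pv_equiv track=rewrite | github.com/mmroch4/university | introduction-to-programming/tests/2025-2026/#1/7/index.py | coords2num
-- ===== SOURCE A (Python) =====
-- def get_sum(i, n):
--   return (i + n) * n // 2
--
-- def coords2num(x, y):
--   if x == 1 and y == 1:
--     return 1
--
--   is_x_even = x % 2 == 0
--   is_y_even = y % 2 == 0
--
--   if x == 1 and y != 1:
--     if is_y_even:
--       return get_sum(1, y - 1) + 1
--     else:
--       return get_sum(1, y)
--   elif x != 1 and y == 1:
--     if is_x_even:
--       return get_sum(1, x)
--     else:
--       return get_sum(1, x - 1) + 1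
--   elif x != 1 and y != 1:
--     if (is_x_even and is_y_even) or (not is_x_even and not is_y_even):
--       return coords2num(1, y + x - 1) - x + 1
--     elif (is_x_even and not is_y_even) or (not is_x_even and is_y_even):
--       return coords2num(x + y - 1, 1) - y + 1
-- ===== SOURCE B (Python) =====
-- def coords2num(x, y):
--     d = x + y - 1
--     t = d * (d - 1) // 2
--     if d % 2 == 0:
--         return t + x
--     return t + d - x + 1
-- ===== Notes on version B (the rewrite author's own statement) =====
-- stated objective: simpler
-- what changed: Replaced A's nested parity branch tree with one-step self-recursion and a get_sum helper by a single closed-form expression: diagonal index d = x+y-1, prefix triangular count t = d*(d-1)//2, then t+x for even d and t+d-x+1 for odd d.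
import Mathlib
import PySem

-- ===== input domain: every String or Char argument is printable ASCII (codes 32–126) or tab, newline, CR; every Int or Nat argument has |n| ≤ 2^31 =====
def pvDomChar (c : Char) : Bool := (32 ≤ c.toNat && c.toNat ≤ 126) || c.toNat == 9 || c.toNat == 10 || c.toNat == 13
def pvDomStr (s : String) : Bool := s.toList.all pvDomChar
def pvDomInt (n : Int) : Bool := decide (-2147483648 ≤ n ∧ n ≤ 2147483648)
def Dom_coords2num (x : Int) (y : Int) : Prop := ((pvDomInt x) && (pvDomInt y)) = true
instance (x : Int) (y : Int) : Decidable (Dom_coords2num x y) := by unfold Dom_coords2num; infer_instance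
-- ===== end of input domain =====

-- B replaces A's parity branch tree (with its one-step self-recursion and get_sum helper)
-- by a single closed-form expression over the diagonal index d = x + y - 1.

-- ===== PORT A =====
def get_sum (i : Int) (n : Int) : Int := PySem.Int.floordiv ((i + n) * n) 2

def coords2num (x : Int) (y : Int) : Int :=
  if x = 1 ∧ y = 1 then 1
  else
    let is_x_even : Bool := PySem.Int.mod x 2 == 0
    let is_y_even : Bool := PySem.Int.mod y 2 == 0
    if x = 1 ∧ y ≠ 1 then
      if is_y_even then get_sum 1 (y - 1) + 1 else get_sum 1 y
    else if x ≠ 1 ∧ y = 1 then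
      if is_x_even then get_sum 1 x else get_sum 1 (x - 1) + 1
    else -- here x ≠ 1 ∧ y ≠ 1 (the remaining Python elif)
      if (is_x_even ∧ is_y_even) ∨ (¬is_x_even ∧ ¬is_y_even) then
        coords2num 1 (y + x - 1) - x + 1
      else -- the remaining parity case (exhaustive in Python too)
        coords2num (x + y - 1) 1 - y + 1
termination_by (if x ≠ 1 ∧ y ≠ 1 then 1 else 0 : Nat)
decreasing_by
  · have hx : ¬x = 1 ∧ ¬y = 1 := by tauto
    simp [hx]
  · have hx : ¬x = 1 ∧ ¬y = 1 := by tauto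
    simp [hx]

-- ===== PORT B =====
def coords2num_alt (x : Int) (y : Int) : Int :=
  let d := x + y - 1
  let t := PySem.Int.floordiv (d * (d - 1)) 2
  if PySem.Int.mod d 2 == 0 then t + x else t + d - x + 1

-- ===== PRECONDITION & SPEC =====
def Spec_coords2num (x : Int) (y : Int) (out : Int) : Prop := out = coords2num_alt x y
instance (x : Int) (y : Int) (out : Int) : Decidable (Spec_coords2num x y out) := by unfold Spec_coords2num; infer_instance

-- ===== CLAIM (what is proved, stated in full; the proofs are below) =====
def Claim_equal_coords2num : Prop := ∀ (x : Int) (y : Int), Dom_coords2num x y → Spec_coords2num x y (coords2num x y)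

-- ===== LEMMAS AND PROOFS =====

-- characterisation of B through an arbitrary name d for x + y - 1
lemma alt_char (x y d : Int) (h : d = x + y - 1) :
    coords2num_alt x y =
      if PySem.Int.mod d 2 == 0 then PySem.Int.floordiv (d * (d - 1)) 2 + x
      else PySem.Int.floordiv (d * (d - 1)) 2 + d - x + 1 := by
  simp only [coords2num_alt]
  rw [← h]

lemma fdiv_shift (a b : Int) : PySem.Int.floordiv (a + 2 * b) 2 = PySem.Int.floordiv a 2 + b := by
  rw [PySem.Int.floordiv_eq_ediv_of_pos (by norm_num), PySem.Int.floordiv_eq_ediv_of_pos (by norm_num)]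
  omega

-- A on the first row y = 1 agrees with B
lemma col1 (m : Int) : coords2num m 1 = coords2num_alt m 1 := by
  by_cases hm : m = 1
  · subst hm
    rw [coords2num, if_pos ⟨rfl, rfl⟩]
    decide
  · rw [coords2num, if_neg (by tauto), if_neg (by tauto), if_pos ⟨hm, rfl⟩,
      alt_char m 1 m (by ring)]
    by_cases hp : (PySem.Int.mod m 2 == 0) = true
    · rw [if_pos hp, if_pos hp]
      show get_sum 1 m = _
      rw [get_sum, show (1 + m) * m = m * (m - 1) + 2 * m by ring, fdiv_shift]
    · rw [if_neg hp, if_neg hp]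
      show get_sum 1 (m - 1) + 1 = _
      rw [get_sum, show (1 + (m - 1)) * (m - 1) = m * (m - 1) by ring]
      generalize PySem.Int.floordiv (m * (m - 1)) 2 = t
      omega

-- A on the first column x = 1 agrees with B
lemma row1 (m : Int) : coords2num 1 m = coords2num_alt 1 m := by
  by_cases hm : m = 1
  · subst hm
    rw [coords2num, if_pos ⟨rfl, rfl⟩]
    decide
  · rw [coords2num, if_neg (by tauto), if_pos ⟨rfl, hm⟩,
      alt_char 1 m m (by ring)]
    by_cases hp : (PySem.Int.mod m 2 == 0) = true
    · rw [if_pos hp, if_pos hp]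
      show get_sum 1 (m - 1) + 1 = _
      rw [get_sum, show (1 + (m - 1)) * (m - 1) = m * (m - 1) by ring]
    · rw [if_neg hp, if_neg hp]
      show get_sum 1 m = _
      rw [get_sum, show (1 + m) * m = m * (m - 1) + 2 * m by ring, fdiv_shift]
      generalize PySem.Int.floordiv (m * (m - 1)) 2 = t
      omega

-- ===== VERDICT (by name: the statement is the Claim_ definition above) =====
theorem coords2num_spec : Claim_equal_coords2num := by
  intro x y _
  show coords2num x y = coords2num_alt x y
  by_cases hx : x = 1
  · subst hx; exact row1 y
  · by_cases hy : y = 1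
    · subst hy; exact col1 x
    · have hex : PySem.Int.mod x 2 = x % 2 := PySem.Int.mod_eq_emod_of_pos (by norm_num)
      have hey : PySem.Int.mod y 2 = y % 2 := PySem.Int.mod_eq_emod_of_pos (by norm_num)
      rw [coords2num, if_neg (by tauto), if_neg (by tauto), if_neg (by tauto)]
      by_cases hpar : x % 2 = y % 2
      · -- same parity: d = x + y - 1 is odd, A recurses through the first column
        have hcond : ((PySem.Int.mod x 2 == 0 : Bool) = true ∧ (PySem.Int.mod y 2 == 0 : Bool) = true)
            ∨ (¬(PySem.Int.mod x 2 == 0 : Bool) = true ∧ ¬(PySem.Int.mod y 2 == 0 : Bool) = true) := by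
          simp only [beq_iff_eq, hex, hey]
          omega
        rw [if_pos hcond, row1 (y + x - 1),
          alt_char 1 (y + x - 1) (x + y - 1) (by ring),
          alt_char x y (x + y - 1) (by ring)]
        have hd : PySem.Int.mod (x + y - 1) 2 = (x + y - 1) % 2 :=
          PySem.Int.mod_eq_emod_of_pos (by norm_num)
        have hodd : ¬((PySem.Int.mod (x + y - 1) 2 == 0 : Bool) = true) := by
          simp only [beq_iff_eq, hd]
          omega
        rw [if_neg hodd, if_neg hodd]
        generalize PySem.Int.floordiv ((x + y - 1) * (x + y - 1 - 1)) 2 = t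
        omega
      · -- different parity: d = x + y - 1 is even, A recurses through the first row
        have hcond : ¬(((PySem.Int.mod x 2 == 0 : Bool) = true ∧ (PySem.Int.mod y 2 == 0 : Bool) = true)
            ∨ (¬(PySem.Int.mod x 2 == 0 : Bool) = true ∧ ¬(PySem.Int.mod y 2 == 0 : Bool) = true)) := by
          simp only [beq_iff_eq, hex, hey]
          omega
        rw [if_neg hcond, col1 (x + y - 1),
          alt_char (x + y - 1) 1 (x + y - 1) (by ring),
          alt_char x y (x + y - 1) (by ring)]
        have hd : PySem.Int.mod (x + y - 1) 2 = (x + y - 1) % 2 :=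
          PySem.Int.mod_eq_emod_of_pos (by norm_num)
        have heven : ((PySem.Int.mod (x + y - 1) 2 == 0 : Bool) = true) := by
          simp only [beq_iff_eq, hd]
          omega
        rw [if_pos heven, if_pos heven]
        generalize PySem.Int.floordiv ((x + y - 1) * (x + y - 1 - 1)) 2 = t
        omega
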